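-- pv_equiv track=rewrite | github.com/AnniePawl/Anna-Interview-Prep | CodeWars/7kyu/arrays/minminmax.py | minminmax
-- ===== SOURCE A (Python) =====
-- def minminmax(numbers):
--   mmm = []
--   smallest = min(numbers)
--   biggest = max(numbers)
--   next_smallest = smallest + 1
--   for i in range(next_smallest, biggest + 1):
--     if i not in numbers:
--       next_smallest = i
--       break
--   return [smallest,next_smallest,biggest]
-- ===== SOURCE B (Python) =====
-- def minminmax(numbers):
--     smallest = min(numbers)
--     biggest = max(numbers)
--     s = sorted(set(numbers))
--     next_smallest = smallest + 1
--     for a, b in zip(s, s[1:]):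
--         if b > a + 1:
--             next_smallest = a + 1
--             break
--     return [smallest, next_smallest, biggest]
-- ===== Notes on version B (the rewrite author's own statement) =====
-- stated objective: alternative
-- what changed: Replaces the per-integer membership scan over range(min+1, max+1) with sorted(set(numbers)) followed by a single adjacent-pair gap scan that finds the first missing integer.
import Mathlib
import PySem

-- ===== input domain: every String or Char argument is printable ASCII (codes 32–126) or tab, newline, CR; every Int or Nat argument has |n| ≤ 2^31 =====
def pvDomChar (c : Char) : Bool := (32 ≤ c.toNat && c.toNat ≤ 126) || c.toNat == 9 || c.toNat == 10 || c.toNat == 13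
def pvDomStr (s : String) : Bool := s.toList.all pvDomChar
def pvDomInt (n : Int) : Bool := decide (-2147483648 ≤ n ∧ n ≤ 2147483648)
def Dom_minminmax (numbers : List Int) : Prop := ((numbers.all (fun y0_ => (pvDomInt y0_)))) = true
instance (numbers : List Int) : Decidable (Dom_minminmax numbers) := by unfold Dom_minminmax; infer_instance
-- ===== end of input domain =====

-- B replaces A's per-integer membership scan over range(min+1, max+1) with sorted(set(numbers))
-- and a single adjacent-pair gap scan (objective: alternative algorithm, same result).

-- ===== PORT A =====
-- the 'for i in range(next_smallest, biggest + 1): if i not in numbers: next_smallest = i; break'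
-- loop, counting i upward exactly as Python's (lazy) range does
def loopA (numbers : List Int) (biggest d i : Int) : Int :=
  if i < biggest + 1 then
    if i ∈ numbers then loopA numbers biggest d (i + 1) else i
  else d
termination_by (biggest + 1 - i).toNat
decreasing_by omega

def minminmax (numbers : List Int) : List Int :=
  match PySem.List.min? numbers (fun x => x), PySem.List.max? numbers (fun x => x) with
  | some smallest, some biggest =>
      [smallest,
       loopA numbers biggest (smallest + 1) (smallest + 1),
       biggest]
  | _, _ => []   -- unreachable: Pre_ requires numbers ≠ [] (Python raises ValueError on [])

-- ===== PORT B =====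
-- the 'for a, b in zip(s, s[1:]): if b > a + 1: next_smallest = a + 1; break' loop
def gapLoop : List (Int × Int) → Int → Int
  | [], d => d
  | (a, b) :: rest, d => if b > a + 1 then a + 1 else gapLoop rest d

def minminmax_alt (numbers : List Int) : List Int :=
  match PySem.List.min? numbers (fun x => x) with
  | none => []   -- unreachable: Pre_ requires numbers ≠ [] (Python raises ValueError on [])
  | some smallest =>
    match PySem.List.max? numbers (fun x => x) with
    | none => []
    | some biggest =>
        let s := PySem.List.sorted (PySem.Set.ofList numbers) (fun x => x) false
        [smallest,
         gapLoop (List.zip s (PySem.List.slice s (some 1) none)) (smallest + 1),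
         biggest]

-- ===== PRECONDITION & SPEC =====
-- Pre_ excludes only the empty list, on which Python's min/max raise ValueError (in A and in B).
def Pre_minminmax (numbers : List Int) : Prop := numbers ≠ []
instance (numbers : List Int) : Decidable (Pre_minminmax numbers) := by unfold Pre_minminmax; infer_instance
def pvWitness_minminmax : List Int := [3, 1, 5, 1]

def Spec_minminmax (numbers : List Int) (out : List Int) : Prop := out = minminmax_alt numbers
instance (numbers : List Int) (out : List Int) : Decidable (Spec_minminmax numbers out) := by unfold Spec_minminmax; infer_instance

-- ===== CLAIM (what is proved, stated in full; the proofs are below) =====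
def Claim_equal_minminmax : Prop := ∀ (numbers : List Int), Dom_minminmax numbers → Pre_minminmax numbers → Spec_minminmax numbers (minminmax numbers)

-- ===== LEMMAS AND PROOFS =====

-- proof-only reformulation of loopA over the materialised range list
def findMissA : List Int → List Int → Int → Int
  | [], _, d => d
  | i :: rest, numbers, d => if i ∈ numbers then findMissA rest numbers d else i

theorem loopA_eq_findMiss (numbers : List Int) (b d : Int) : ∀ (n : Nat) (i : Int),
    (b + 1 - i).toNat = n →
    loopA numbers b d i = findMissA (PySem.List.pyRange i (b + 1) 1) numbers d := by
  intro n
  induction n with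
  | zero =>
      intro i hn
      rw [loopA, if_neg (by omega), PySem.List.pyRange_one_eq_nil (by omega)]
      rfl
  | succ k ih =>
      intro i hn
      rw [loopA, if_pos (by omega), PySem.List.pyRange_one_cons (by omega)]
      simp only [findMissA]
      by_cases hx : i ∈ numbers
      · rw [if_pos hx, if_pos hx, ih (i + 1) (by omega)]
      · rw [if_neg hx, if_neg hx]

-- findMissA only looks at membership of the range elements
theorem findMissA_congr (rng : List Int) (xs ys : List Int) (d : Int)
    (h : ∀ i ∈ rng, (i ∈ xs ↔ i ∈ ys)) : findMissA rng xs d = findMissA rng ys d := by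
  induction rng with
  | nil => rfl
  | cons i rest ih =>
      simp only [findMissA]
      have hi := h i (by simp)
      by_cases hx : i ∈ xs
      · rw [if_pos hx, if_pos (hi.mp hx)]
        exact ih fun j hj => h j (by simp [hj])
      · rw [if_neg hx, if_neg (fun hy => hx (hi.mpr hy))]

-- core: on a strictly increasing list m :: t whose elements are ≤ M and contain M,
-- A's scan of [m+1..M] for the first missing element equals B's adjacent-gap scan.
theorem main_lemma (t : List Int) : ∀ (m M d : Int),
    (m :: t).Pairwise (· < ·) → (∀ x ∈ m :: t, x ≤ M) → M ∈ m :: t →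
    findMissA (PySem.List.pyRange (m + 1) (M + 1) 1) (m :: t) d
      = gapLoop (List.zip (m :: t) t) d := by
  induction t with
  | nil =>
      intro m M d _ _ hM
      have : M = m := by simpa using hM
      subst this
      rw [PySem.List.pyRange_one_eq_nil (by omega)]
      rfl
  | cons b rest ih =>
      intro m M d hp hle hM
      have hmb : m < b := by
        have := List.pairwise_cons.mp hp
        exact this.1 b (by simp)
      have hbM : b ≤ M := hle b (by simp)
      have hrest : ∀ x ∈ b :: rest, b ≤ x := by
        intro x hx
        rcases List.mem_cons.mp hx with h | h
        · omega
        · have := (List.pairwise_cons.mp (List.pairwise_cons.mp hp).2).1 x h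
          omega
      by_cases hgap : b > m + 1
      · -- gap right away: both return m+1
        rw [PySem.List.pyRange_one_cons (by omega)]
        simp only [findMissA]
        have hnot : (m + 1) ∉ m :: b :: rest := by
          intro hmem
          rcases List.mem_cons.mp hmem with h | h
          · omega
          · have := hrest _ h; omega
        rw [if_neg hnot]
        simp only [List.zip, List.zipWith, gapLoop]
        rw [if_pos hgap]
      · -- b = m + 1: step both scans
        have hb : b = m + 1 := by omega
        rw [PySem.List.pyRange_one_cons (by omega)]
        simp only [findMissA]
        rw [if_pos (by simp [hb])]
        have hcongr : findMissA (PySem.List.pyRange (m + 1 + 1) (M + 1) 1) (m :: b :: rest) d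
            = findMissA (PySem.List.pyRange (m + 1 + 1) (M + 1) 1) (b :: rest) d := by
          apply findMissA_congr
          intro i hi
          have hib : m + 1 + 1 ≤ i := (PySem.List.mem_pyRange_one.mp hi).1
          constructor
          · intro h
            rcases List.mem_cons.mp h with h | h
            · omega
            · exact h
          · intro h; exact List.mem_cons_of_mem _ h
        rw [hcongr, hb]
        have hM' : M ∈ (m+1) :: rest := by
          rcases List.mem_cons.mp hM with h | h
          · omega
          · rwa [hb] at h
        have := ih (m + 1) M d (by rw [hb] at hp; exact (List.pairwise_cons.mp hp).2)
          (by intro x hx; exact hle x (by rw [hb]; exact List.mem_cons_of_mem _ hx)) hM'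
        rw [this]
        simp only [List.zip, List.zipWith, gapLoop]
        rw [if_neg (by omega)]

theorem minminmax_spec : Claim_equal_minminmax := by
  intro numbers _ hne
  unfold Spec_minminmax minminmax minminmax_alt
  have hmin : ∃ m, PySem.List.min? numbers (fun x => x) = some m := by
    cases h : PySem.List.min? numbers (fun x => x) with
    | none => exact absurd ((PySem.List.min?_eq_none_iff _ _).mp h) hne
    | some m => exact ⟨m, rfl⟩
  have hmax : ∃ M, PySem.List.max? numbers (fun x => x) = some M := by
    cases h : PySem.List.max? numbers (fun x => x) with
    | none => exact absurd ((PySem.List.max?_eq_none_iff _ _).mp h) hne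
    | some M => exact ⟨M, rfl⟩
  obtain ⟨m, hm⟩ := hmin
  obtain ⟨M, hM⟩ := hmax
  rw [hm, hM]
  dsimp only
  -- the sorted distinct list
  set s := PySem.List.sorted (PySem.Set.ofList numbers) (fun x => x) false with hs
  have hmem : ∀ x, x ∈ s ↔ x ∈ numbers := by
    intro x
    rw [hs, PySem.List.mem_sorted, PySem.Set.mem_ofList]
  have hsne : s ≠ [] := by
    intro h
    have h2 : PySem.Set.ofList numbers = [] := (PySem.List.sorted_eq_nil_iff _ _ _).mp h
    have h3 : m ∈ PySem.Set.ofList numbers := (PySem.Set.mem_ofList numbers m).mpr (PySem.List.min?_mem hm)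
    rw [h2] at h3
    simp at h3
  obtain ⟨h0, t, hst⟩ := List.exists_cons_of_ne_nil hsne
  have hpair : s.Pairwise (· < ·) := hs ▸ PySem.List.sorted_ofList_pairwise_lt numbers
  -- head of s = m
  have hh : h0 = m := by
    have h1 : ∀ y ∈ PySem.Set.ofList numbers, h0 ≤ y :=
      PySem.List.key_head_sorted_le (PySem.Set.ofList numbers) (fun x => x) hst
    have h2 : h0 ≤ m := h1 m ((PySem.Set.mem_ofList numbers m).mpr (PySem.List.min?_mem hm))
    have h3 : m ≤ h0 := by
      have : h0 ∈ numbers := (hmem h0).mp (by simp [hst])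
      exact PySem.List.min?_isMin hm h0 this
    omega
  have hle : ∀ x ∈ s, x ≤ M := by
    intro x hx
    exact PySem.List.max?_isMax hM x ((hmem x).mp hx)
  have hMs : M ∈ s := (hmem M).mpr (PySem.List.max?_mem hM)
  have hcongr : findMissA (PySem.List.pyRange (m + 1) (M + 1) 1) numbers (m + 1)
      = findMissA (PySem.List.pyRange (m + 1) (M + 1) 1) s (m + 1) :=
    findMissA_congr _ _ _ _ (fun i _ => (hmem i).symm)
  rw [loopA_eq_findMiss numbers M (m + 1) (M + 1 - (m + 1)).toNat (m + 1) rfl]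
  subst hh
  rw [hcongr, hst]
  have hmain := main_lemma t h0 M (h0 + 1) (hst ▸ hpair) (hst ▸ hle) (hst ▸ hMs)
  rw [hmain, PySem.List.slice_from_one]
  rfl
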